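-- pv_equiv track=rewrite | github.com/AugustoAleGon/algoritm-datastructure-p1 | Task4.py | remove_telemarketers_sms
-- ===== SOURCE A (Python) =====
-- def remove_telemarketers_sms(list_messages, ongoing_calls):
--     for message in list_messages:
--         if message[0].startswith("140"):
--             if message[0] in ongoing_calls:
--                 ongoing_calls.remove(message[0])
--         if message[1].startswith("140"):
--             if message[1] in ongoing_calls:
--                 ongoing_calls.remove(message[1])
--     ongoing_calls.sort()
--     return ongoing_calls
-- ===== SOURCE B (Python) =====
-- def remove_telemarketers_sms(list_messages, ongoing_calls):
--     # Count 140-prefixed message fields once, then drop calls against that budget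
--     # in a single pass; same in-place mutation of ongoing_calls as the original.
--     budget = {}
--     for message in list_messages:
--         a = message[0]
--         if a.startswith("140"):
--             budget[a] = budget.get(a, 0) + 1
--         b = message[1]
--         if b.startswith("140"):
--             budget[b] = budget.get(b, 0) + 1
--     kept = []
--     for call in ongoing_calls:
--         if budget.get(call, 0) > 0:
--             budget[call] -= 1
--         else:
--             kept.append(call)
--     kept.sort()
--     ongoing_calls[:] = kept
--     return ongoing_calls
-- ===== Notes on version B (the rewrite author's own statement) =====
-- stated objective: alternative
-- what changed: Instead of scanning ongoing_calls for membership and calling .remove per 140-prefixed message field, B builds a dict of removal budgets over the message fields once and then filters ongoing_calls in a single decrementing pass before sorting.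
import Mathlib
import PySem

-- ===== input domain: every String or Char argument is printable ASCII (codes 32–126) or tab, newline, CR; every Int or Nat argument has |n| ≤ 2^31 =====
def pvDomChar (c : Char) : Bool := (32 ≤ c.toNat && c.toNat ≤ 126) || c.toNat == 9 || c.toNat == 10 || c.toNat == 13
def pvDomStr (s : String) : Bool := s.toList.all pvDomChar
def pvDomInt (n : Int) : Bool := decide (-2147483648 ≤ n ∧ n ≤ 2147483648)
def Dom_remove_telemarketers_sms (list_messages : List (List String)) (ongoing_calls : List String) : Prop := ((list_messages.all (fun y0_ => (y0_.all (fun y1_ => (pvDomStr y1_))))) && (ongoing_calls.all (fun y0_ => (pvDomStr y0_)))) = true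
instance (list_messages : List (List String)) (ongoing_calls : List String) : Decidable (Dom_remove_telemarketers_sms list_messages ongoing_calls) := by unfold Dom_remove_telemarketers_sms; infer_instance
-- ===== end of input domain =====

-- B replaces A's per-message membership scan + .remove scan of ongoing_calls by a budget
-- dict built once over the message fields and a single filtering pass (objective: alternative).
-- Both Pythons mutate ongoing_calls in place the same way; the theorems are about the return value.

-- ===== PORT A =====
-- one field: if f.startswith("140"): if f in ongoing_calls: ongoing_calls.remove(f)
-- (remove? is some here because the membership guard holds; .getD is never the default branch)
def pvStepField (cs : List String) (f : String) : List String :=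
  if PySem.Str.startswith f "140" then
    if f ∈ cs then (PySem.List.remove? cs f).getD cs else cs
  else cs

-- one message: message[0] then message[1]; Pre_ guarantees both indices exist, so the
-- "" default of pyGet? is never read under Pre_ (Python raises IndexError there)
def pvStepMsg (cs : List String) (m : List String) : List String :=
  pvStepField (pvStepField cs ((PySem.List.pyGet? m 0).getD "")) ((PySem.List.pyGet? m 1).getD "")

def remove_telemarketers_sms (list_messages : List (List String)) (ongoing_calls : List String) : List String :=
  PySem.List.sorted (list_messages.foldl pvStepMsg ongoing_calls) (fun x => x) false

-- ===== PORT B =====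
-- budget[f] = budget.get(f, 0) + 1, guarded by startswith("140")
def pvInc (d : PySem.Dict String Int) (f : String) : PySem.Dict String Int :=
  if PySem.Str.startswith f "140" then d.insert f (d.getD f 0 + 1) else d

def pvIncMsg (d : PySem.Dict String Int) (m : List String) : PySem.Dict String Int :=
  pvInc (pvInc d ((PySem.List.pyGet? m 0).getD "")) ((PySem.List.pyGet? m 1).getD "")

-- the filtering pass: drop a call while its budget is positive (decrementing), else keep it
def pvFilterStep (s : List String × PySem.Dict String Int) (c : String) : List String × PySem.Dict String Int :=
  if s.2.getD c 0 > 0 then (s.1, s.2.insert c (s.2.getD c 0 - 1)) else (s.1 ++ [c], s.2)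

def remove_telemarketers_sms_alt (list_messages : List (List String)) (ongoing_calls : List String) : List String :=
  let budget := list_messages.foldl pvIncMsg PySem.Dict.empty
  PySem.List.sorted (ongoing_calls.foldl pvFilterStep ([], budget)).1 (fun x => x) false

-- ===== PRECONDITION & SPEC =====
-- Pre_ excludes exactly the inputs where Python A raises IndexError: a message with
-- fewer than two fields (A reads message[0] and message[1] unconditionally; B does too).
def Pre_remove_telemarketers_sms (list_messages : List (List String)) (ongoing_calls : List String) : Prop :=
  ∀ m ∈ list_messages, 2 ≤ m.length
instance (list_messages : List (List String)) (ongoing_calls : List String) : Decidable (Pre_remove_telemarketers_sms list_messages ongoing_calls) := by unfold Pre_remove_telemarketers_sms; infer_instance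

def pvWitness_remove_telemarketers_sms : List (List String) × List String :=
  ([["1401", "7"], ["8", "1402"]], ["1402", "5", "1401", "1402"])

def Spec_remove_telemarketers_sms (list_messages : List (List String)) (ongoing_calls : List String) (out : List String) : Prop := out = remove_telemarketers_sms_alt list_messages ongoing_calls
instance (list_messages : List (List String)) (ongoing_calls : List String) (out : List String) : Decidable (Spec_remove_telemarketers_sms list_messages ongoing_calls out) := by unfold Spec_remove_telemarketers_sms; infer_instance

-- ===== CLAIM (what is proved, stated in full; the proofs are below) =====
def Claim_equal_remove_telemarketers_sms : Prop := ∀ (list_messages : List (List String)) (ongoing_calls : List String), Dom_remove_telemarketers_sms list_messages ongoing_calls → Pre_remove_telemarketers_sms list_messages ongoing_calls → Spec_remove_telemarketers_sms list_messages ongoing_calls (remove_telemarketers_sms list_messages ongoing_calls)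

-- ===== LEMMAS AND PROOFS =====

-- the first component of B's filtering fold, with explicit accumulator
def pvFilt (cs : List String) (acc : List String) (d : PySem.Dict String Int) : List String :=
  (cs.foldl pvFilterStep (acc, d)).1

theorem pvFilt_nil (acc : List String) (d : PySem.Dict String Int) : pvFilt [] acc d = acc := rfl

theorem pvFilt_cons (c : String) (cs acc : List String) (d : PySem.Dict String Int) :
    pvFilt (c :: cs) acc d =
      if d.getD c 0 > 0 then pvFilt cs acc (d.insert c (d.getD c 0 - 1)) else pvFilt cs (acc ++ [c]) d := by
  simp only [pvFilt, List.foldl_cons, pvFilterStep]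
  split <;> rfl

-- filtering only reads the budget at the elements of cs
theorem pvFilt_congr (cs : List String) : ∀ (acc : List String) (d1 d2 : PySem.Dict String Int),
    (∀ k ∈ cs, d1.getD k 0 = d2.getD k 0) → pvFilt cs acc d1 = pvFilt cs acc d2 := by
  induction cs with
  | nil => intro acc d1 d2 _; rfl
  | cons c cs ih =>
    intro acc d1 d2 h
    rw [pvFilt_cons, pvFilt_cons, h c (by simp)]
    split
    · apply ih
      intro k hk
      rw [PySem.Dict.getD_insert, PySem.Dict.getD_insert]
      split
      · rfl
      · exact h k (by simp [hk])
    · exact ih _ _ _ (fun k hk => h k (by simp [hk]))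

theorem pvInc_getD (d : PySem.Dict String Int) (f k : String) :
    (pvInc d f).getD k 0 = d.getD k 0 + (if PySem.Str.startswith f "140" = true ∧ k = f then 1 else 0) := by
  simp only [pvInc]
  split
  · rw [PySem.Dict.getD_insert]
    split_ifs with h1 h2 h3 <;> simp_all
  · simp_all

-- removing the first occurrence of f and then filtering = filtering with one more budget for f
theorem pvFilt_erase (cs : List String) : ∀ (acc : List String) (d : PySem.Dict String Int),
    f ∈ cs → 0 ≤ d.getD f 0 →
    pvFilt (cs.erase f) acc d = pvFilt cs acc (d.insert f (d.getD f 0 + 1)) := by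
  induction cs with
  | nil => intro acc d h; simp at h
  | cons c cs ih =>
    intro acc d hmem hnn
    by_cases hcf : c = f
    · subst hcf
      rw [List.erase_cons_head, pvFilt_cons]
      have h1 : (d.insert c (d.getD c 0 + 1)).getD c 0 = d.getD c 0 + 1 := by
        rw [PySem.Dict.getD_insert]; simp
      rw [h1, if_pos (by omega), PySem.Dict.insert_insert_self]
      apply pvFilt_congr
      intro k hk
      rw [PySem.Dict.getD_insert]
      split
      · subst ‹k = c›; omega
      · rfl
    · have hfs : f ∈ cs := by
        rcases List.mem_cons.mp hmem with h | h
        · exact absurd h.symm hcf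
        · exact h
      rw [List.erase_cons_tail (by simp [hcf]), pvFilt_cons, pvFilt_cons]
      have hgc : (d.insert f (d.getD f 0 + 1)).getD c 0 = d.getD c 0 := by
        rw [PySem.Dict.getD_insert, if_neg hcf]
      rw [hgc]
      split
      · -- positive budget at c: both sides decrement at c
        have hfc : f ≠ c := fun h => hcf h.symm
        have hdf : (d.insert c (d.getD c 0 - 1)).getD f 0 = d.getD f 0 := by
          rw [PySem.Dict.getD_insert, if_neg hfc]
        rw [ih acc _ hfs (by rw [hdf]; exact hnn), hdf]
        apply pvFilt_congr
        intro k hk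
        simp only [PySem.Dict.getD_insert]
        split_ifs with h1 h2 <;> simp_all
      · exact ih _ _ hfs hnn

-- one field step of A = one budget increment of B, under the filter
theorem pvFilt_stepField (cs acc : List String) (f : String) (d : PySem.Dict String Int)
    (hnn : 0 ≤ d.getD f 0) :
    pvFilt (pvStepField cs f) acc d = pvFilt cs acc (pvInc d f) := by
  simp only [pvStepField, pvInc]
  split
  · split
    · rename_i hmem
      rw [PySem.List.remove?_eq_some_erase _ _ hmem]
      exact pvFilt_erase cs acc d hmem hnn
    · rename_i hmem
      apply pvFilt_congr
      intro k hk
      rw [PySem.Dict.getD_insert, if_neg (fun (h : k = f) => hmem (h ▸ hk))]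
  · rfl

theorem pvInc_nonneg (d : PySem.Dict String Int) (f : String)
    (h : ∀ k, 0 ≤ d.getD k 0) : ∀ k, 0 ≤ (pvInc d f).getD k 0 := by
  intro k
  rw [pvInc_getD]
  have := h k
  split <;> omega

theorem pvBuild_nonneg (ms : List (List String)) : ∀ (d : PySem.Dict String Int),
    (∀ k, 0 ≤ d.getD k 0) → ∀ k, 0 ≤ (ms.foldl pvIncMsg d).getD k 0 := by
  induction ms with
  | nil => intro d h; exact h
  | cons m ms ih =>
    intro d h
    exact ih _ (pvInc_nonneg _ _ (pvInc_nonneg _ _ h))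

-- the budget built on top of d is d plus the budget built from empty (pointwise)
theorem pvBuild_getD (ms : List (List String)) : ∀ (d : PySem.Dict String Int) (k : String),
    (ms.foldl pvIncMsg d).getD k 0 = d.getD k 0 + (ms.foldl pvIncMsg PySem.Dict.empty).getD k 0 := by
  induction ms with
  | nil => intro d k; simp [PySem.Dict.getD_empty]
  | cons m ms ih =>
    intro d k
    simp only [List.foldl_cons]
    rw [ih (pvIncMsg d m) k, ih (pvIncMsg PySem.Dict.empty m) k]
    simp only [pvIncMsg]
    rw [pvInc_getD, pvInc_getD, pvInc_getD, pvInc_getD, PySem.Dict.getD_empty]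
    ring

-- MAIN INVARIANT: A's sequential removals, then filtering with residual budget d,
-- equals filtering the original calls with the budget grown by all the messages
theorem pvMain (ms : List (List String)) : ∀ (cs : List String) (d : PySem.Dict String Int),
    (∀ k, 0 ≤ d.getD k 0) →
    pvFilt (ms.foldl pvStepMsg cs) [] d = pvFilt cs [] (ms.foldl pvIncMsg d) := by
  induction ms with
  | nil => intro cs d _; rfl
  | cons m ms ih =>
    intro cs d hnn
    simp only [List.foldl_cons]
    rw [ih (pvStepMsg cs m) d hnn]
    have hD : ∀ k, 0 ≤ (ms.foldl pvIncMsg d).getD k 0 := pvBuild_nonneg ms d hnn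
    simp only [pvStepMsg]
    rw [pvFilt_stepField _ _ _ _ (hD _), pvFilt_stepField _ _ _ _ (pvInc_nonneg _ _ hD _)]
    apply pvFilt_congr
    intro k _
    rw [pvInc_getD, pvInc_getD, pvBuild_getD ms (pvIncMsg d m) k]
    simp only [pvIncMsg]
    rw [pvInc_getD, pvInc_getD, pvBuild_getD ms d k]
    ring

-- filtering with an empty budget keeps everything
theorem pvFilt_empty (cs : List String) : ∀ (acc : List String),
    pvFilt cs acc PySem.Dict.empty = acc ++ cs := by
  induction cs with
  | nil => intro acc; simp [pvFilt_nil]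
  | cons c cs ih =>
    intro acc
    rw [pvFilt_cons, PySem.Dict.getD_empty, if_neg (by omega), ih]
    simp

-- ===== VERDICT (by name: the statement is the Claim_ definition above) =====
theorem remove_telemarketers_sms_spec : Claim_equal_remove_telemarketers_sms := by
  intro lm oc _ _
  unfold Spec_remove_telemarketers_sms remove_telemarketers_sms remove_telemarketers_sms_alt
  have h := pvMain lm oc PySem.Dict.empty (fun k => by rw [PySem.Dict.getD_empty])
  rw [pvFilt_empty, List.nil_append] at h
  show PySem.List.sorted (lm.foldl pvStepMsg oc) (fun x => x) false =
       PySem.List.sorted (oc.foldl pvFilterStep ([], lm.foldl pvIncMsg PySem.Dict.empty)).1 (fun x => x) false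
  rw [h]; rfl
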